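-- pv_equiv track=rewrite | github.com/P4DS2023/chatbot | utils/filter.py | filter_llm_response
-- ===== SOURCE A (Python) =====
-- def filter_llm_response(response):
--     tags = ["Candidate:", "Interviewer:", "Command:", "System:"]
--
--     # find first occurence of any in tags, then return everything after that including the tag
--     tag_indices = []
--     for tag in tags:
--         # check if tag in response
--         if tag in response:
--             # get index of tag
--             tag_indices.append(response.index(tag))
--
--     if len(tag_indices) == 0:
--         # no tag found, return everything
--         return response
--
--     return response[min(tag_indices):]
-- ===== SOURCE B (Python) =====
-- def filter_llm_response(response):
--     tags = ("Candidate:", "Interviewer:", "Command:", "System:")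
--     for i in range(len(response)):
--         if response.startswith(tags, i):
--             return response[i:]
--     return response
-- ===== Notes on version B (the rewrite author's own statement) =====
-- stated objective: simpler
-- what changed: B does one left-to-right positional scan, returning the suffix at the first position where any tag starts (str.startswith with a tuple), instead of A's four independent full substring searches collected into a list and then minimised.
import Mathlib
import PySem

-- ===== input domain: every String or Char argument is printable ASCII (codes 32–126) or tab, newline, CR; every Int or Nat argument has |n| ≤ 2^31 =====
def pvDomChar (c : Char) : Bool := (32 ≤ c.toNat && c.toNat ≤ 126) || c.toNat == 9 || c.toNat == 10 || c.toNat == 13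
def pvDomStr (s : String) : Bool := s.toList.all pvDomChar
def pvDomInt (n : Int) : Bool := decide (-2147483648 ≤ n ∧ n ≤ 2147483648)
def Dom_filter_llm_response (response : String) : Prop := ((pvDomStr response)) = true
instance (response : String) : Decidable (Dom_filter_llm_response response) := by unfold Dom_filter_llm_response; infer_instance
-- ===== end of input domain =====

-- B replaces A's four independent substring searches + min with a single left-to-right
-- positional scan that returns the suffix at the first position where any tag starts (simpler).

-- ===== PORT A =====
def filter_llm_response (response : String) : String :=
  let tags : List String := ["Candidate:", "Interviewer:", "Command:", "System:"]
  let tag_indices : List Int :=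
    tags.foldl (fun acc tag =>
      if PySem.Str.isIn tag response then acc ++ [PySem.Str.find response tag] else acc) []
  if tag_indices.length == 0 then
    response
  else
    match PySem.List.min? tag_indices (fun x => x) with
    | some m => PySem.Str.slice response (some m) none
    | none => response

-- ===== PORT B =====
def pvTagsChars : List (List Char) :=
  ["Candidate:".toList, "Interviewer:".toList, "Command:".toList, "System:".toList]

-- the scan 'for i in range(len(response)): if response.startswith(tags, i): return response[i:]'
def pvScan : List Char → Option (List Char)
  | [] => none
  | c :: rest =>
    if pvTagsChars.any (fun t => PySem.Chars.startswith (c :: rest) t) then some (c :: rest)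
    else pvScan rest

def filter_llm_response_alt (response : String) : String :=
  match pvScan response.toList with
  | some suf => String.ofList suf
  | none => response

-- ===== PRECONDITION & SPEC =====
def Spec_filter_llm_response (response : String) (out : String) : Prop := out = filter_llm_response_alt response
instance (response : String) (out : String) : Decidable (Spec_filter_llm_response response out) := by unfold Spec_filter_llm_response; infer_instance

-- ===== CLAIM (what is proved, stated in full; the proofs are below) =====
def Claim_equal_filter_llm_response : Prop := ∀ (response : String), Dom_filter_llm_response response → Spec_filter_llm_response response (filter_llm_response response)

-- ===== LEMMAS AND PROOFS =====

theorem pvTags_ne_nil : ∀ t ∈ pvTagsChars, t ≠ [] := by decide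

-- if the scan finds nothing, no tag is a prefix of any suffix
theorem pvScan_none (s : List Char) (h : pvScan s = none) :
    ∀ j, ∀ t ∈ pvTagsChars, ¬ t <+: s.drop j := by
  induction s with
  | nil =>
    intro j t ht hp
    exact pvTags_ne_nil t ht (List.prefix_nil.mp (by simpa using hp))
  | cons c rest ih =>
    intro j t ht hp
    rw [pvScan] at h
    split at h
    · exact Option.some_ne_none _ h
    · rename_i hany
      cases j with
      | zero =>
        exact hany (List.any_eq_true.mpr ⟨t, ht, by
          simpa using (PySem.Chars.startswith_iff (c :: rest) t).mpr (by simpa using hp)⟩)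
      | succ j' => exact ih h j' t ht (by simpa using hp)

-- if the scan returns a suffix, it is s.drop k for the least k where some tag matches
theorem pvScan_some (s r : List Char) (h : pvScan s = some r) :
    ∃ k, r = s.drop k ∧ (∃ t ∈ pvTagsChars, t <+: s.drop k) ∧
      ∀ i < k, ∀ t ∈ pvTagsChars, ¬ t <+: s.drop i := by
  induction s generalizing r with
  | nil => simp [pvScan] at h
  | cons c rest ih =>
    rw [pvScan] at h
    split at h
    · rename_i hany
      obtain ⟨t, ht, hsw⟩ := List.any_eq_true.mp hany
      refine ⟨0, by simpa using h.symm, ⟨t, ht, ?_⟩, by omega⟩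
      simpa using (PySem.Chars.startswith_iff (c :: rest) t).mp hsw
    · rename_i hany
      obtain ⟨k, hr, ⟨t, ht, hp⟩, hmin⟩ := ih r h
      refine ⟨k + 1, by simpa using hr, ⟨t, ht, by simpa using hp⟩, ?_⟩
      intro i hi t' ht' hp'
      cases i with
      | zero =>
        exact hany (List.any_eq_true.mpr ⟨t', ht', by
          simpa using (PySem.Chars.startswith_iff (c :: rest) t').mpr (by simpa using hp')⟩)
      | succ i' => exact hmin i' (by omega) t' ht' (by simpa using hp')

-- a tag-as-chars is the .toList of a tag in A's string list
theorem pvTags_mem_iff (t : List Char) :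
    t ∈ pvTagsChars ↔ ∃ tag ∈ (["Candidate:", "Interviewer:", "Command:", "System:"] : List String), tag.toList = t := by
  constructor
  · intro h
    simp only [pvTagsChars, List.mem_cons] at h
    rcases h with h | h | h | (h | h) <;> first
      | exact ⟨"Candidate:", by simp, h.symm⟩
      | exact ⟨"Interviewer:", by simp, h.symm⟩
      | exact ⟨"Command:", by simp, h.symm⟩
      | exact ⟨"System:", by simp, h.symm⟩
      | simp at h
  · rintro ⟨tag, htag, rfl⟩
    simp only [List.mem_cons] at htag
    rcases htag with rfl | rfl | rfl | (rfl | h) <;> first | decide | simp at h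

theorem filter_spec_aux (response : String) :
    filter_llm_response response = filter_llm_response_alt response := by
  unfold filter_llm_response filter_llm_response_alt
  set L := response.toList with hL
  set tagsS : List String := ["Candidate:", "Interviewer:", "Command:", "System:"] with htagsS
  simp only [PySem.List.foldl_append_if, List.nil_append]
  cases hscan : pvScan L with
  | none =>
    have hfilter : tagsS.filter (fun tag => PySem.Str.isIn tag response) = [] := by
      rw [List.filter_eq_nil_iff]
      intro tag htag hIn
      have hin : tag.toList <:+: L := by
        have := (PySem.Str.isIn_iff_infix tag response).mp (by simpa using hIn)
        simpa [hL] using this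
      obtain ⟨j, hj⟩ := (PySem.Chars.exists_prefix_drop_iff_isIn (sub := tag.toList) (s := L)).mpr
        ((PySem.Chars.isIn_iff_infix _ _).mpr hin)
      exact pvScan_none L hscan j tag.toList ((pvTags_mem_iff _).mpr ⟨tag, htag, rfl⟩) hj
    rw [hfilter]
    simp
  | some r =>
    obtain ⟨k, hr, ⟨t0, ht0, hp0⟩, hleast⟩ := pvScan_some L r hscan
    obtain ⟨tag0, htag0, rfl⟩ := (pvTags_mem_iff t0).mp ht0
    -- tag0 occurs, so the filtered list is nonempty
    have hIn0 : PySem.Str.isIn tag0 response = true := by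
      rw [PySem.Str.isIn_iff_infix]
      exact hp0.isInfix.trans (List.drop_suffix k L).isInfix
    have hmem0 : tag0 ∈ tagsS.filter (fun tag => PySem.Str.isIn tag response) :=
      List.mem_filter.mpr ⟨htag0, hIn0⟩
    have hne : (tagsS.filter (fun tag => PySem.Str.isIn tag response)).map
        (fun tag => PySem.Str.find response tag) ≠ [] := by
      intro hnil
      rw [List.map_eq_nil_iff] at hnil
      rw [hnil] at hmem0
      simp at hmem0
    cases hmin : PySem.List.min? ((tagsS.filter (fun tag => PySem.Str.isIn tag response)).map
        (fun tag => PySem.Str.find response tag)) (fun x => x) with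
    | none =>
      rw [PySem.List.min?_eq_none_iff] at hmin
      exact absurd hmin hne
    | some m =>
      -- m = find response tag1 for a present tag1
      obtain ⟨tag1, htag1f, hm⟩ := List.mem_map.mp (PySem.List.min?_mem hmin)
      obtain ⟨htag1, hIn1⟩ := List.mem_filter.mp htag1f
      have hm0 : 0 ≤ m := by
        rw [← hm]
        exact (PySem.Str.find_nonneg_iff response tag1).mpr
          ((PySem.Str.isIn_iff_infix tag1 response).mp hIn1)
      have hfind1 := PySem.Chars.find_spec (s := L) (sub := tag1.toList)
        (by rw [PySem.Str.find] at hm; rw [hL]; omega)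
      -- find values as Chars.find on L
      have hfind_eq : ∀ tag : String, PySem.Str.find response tag = PySem.Chars.find L tag.toList := by
        intro tag; rw [hL]; simp [PySem.Str.find]
      rw [hfind_eq tag1] at hm
      -- k ≤ m.toNat
      have hk_le : k ≤ m.toNat := by
        by_contra hlt
        exact hleast m.toNat (by omega) tag1.toList
          ((pvTags_mem_iff _).mpr ⟨tag1, htag1, rfl⟩)
          (hm ▸ hfind1.1)
      -- m.toNat ≤ k : the minimum is ≤ find of tag0, whose occurrence is ≤ k
      have hfind0_le : (PySem.Chars.find L tag0.toList).toNat ≤ k := by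
        have hnn : 0 ≤ PySem.Chars.find L tag0.toList :=
          (PySem.Chars.find_nonneg_iff _ _).mpr
            (hp0.isInfix.trans (List.drop_suffix k L).isInfix)
        have hspec0 := PySem.Chars.find_spec (s := L) (sub := tag0.toList) hnn
        by_contra hgt
        exact hspec0.2 k (by omega) hp0
      have hm_le : m ≤ PySem.Chars.find L tag0.toList := by
        have := PySem.List.min?_isMin hmin (PySem.Str.find response tag0)
          (List.mem_map.mpr ⟨tag0, hmem0, rfl⟩)
        rw [hfind_eq tag0] at this
        exact this
      have hkm : m.toNat = k := by omega
      -- both sides are L.drop k as strings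
      have : (PySem.Str.slice response (some m) none).toList = L.drop k := by
        rw [PySem.Str.toList_slice, ← hL, PySem.Chars.slice_eq_listSlice,
          PySem.List.slice_from _ hm0, hkm]
      rw [if_neg (by simpa using hne)]
      apply String.toList_inj.mp
      rw [this, hr, String.toList_ofList]

-- ===== VERDICT (by name: the statement is the Claim_ definition above) =====
theorem filter_llm_response_spec : Claim_equal_filter_llm_response := by
  intro response _
  unfold Spec_filter_llm_response
  exact filter_spec_aux response
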